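-- pv_equiv track=rewrite | github.com/AaronElijah/AdventOfCode2021 | Day12/solution2.py | is_able_visit_next_node
-- ===== SOURCE A (Python) =====
-- from typing import Dict, List
-- from collections import Counter
--
-- def is_able_visit_next_node(next_node: str, cur_path: List[str]) -> bool:
--     if next_node == "start":  # cannot revisit start node
--         return False
--
--     if next_node.isupper():
--         return True
--     # check for if a single small cave has been visited twice
--     node_count = Counter(cur_path)
--
--     for key, value in node_count.items():
--         if key.islower() and value == 2:
--             if key == next_node:
--                 return False  # cannot visit a small cave three times
--             else:
--                 if node_count[next_node] == 0:  # can visit a small cave at least once but cannot visit two small caves twice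
--                     return True
--                 else:
--                     return False
--     else:
--         return True  # no small caves have been visited twice
-- ===== SOURCE B (Python) =====
-- def is_able_visit_next_node(next_node, cur_path):
--     if next_node == "start":
--         return False
--     if next_node.isupper():
--         return True
--     # sort the path, then scan maximal runs of equal names: a run of length
--     # exactly 2 headed by a lowercase name means a small cave was visited twice
--     s = sorted(cur_path)
--     i = 0
--     n = len(s)
--     while i < n:
--         j = i + 1
--         while j < n and s[j] == s[i]:
--             j += 1
--         if j - i == 2 and s[i].islower():
--             return next_node not in cur_path
--         i = j
--     return True
-- ===== Notes on version B (the rewrite author's own statement) =====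
-- stated objective: alternative
-- what changed: Replaces the Counter hash-count plus first-match loop with nested in-loop branches by sort-then-scan: sort the path, walk maximal runs of equal names, and on the first lowercase run of length exactly 2 answer with a single membership test.
import Mathlib
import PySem

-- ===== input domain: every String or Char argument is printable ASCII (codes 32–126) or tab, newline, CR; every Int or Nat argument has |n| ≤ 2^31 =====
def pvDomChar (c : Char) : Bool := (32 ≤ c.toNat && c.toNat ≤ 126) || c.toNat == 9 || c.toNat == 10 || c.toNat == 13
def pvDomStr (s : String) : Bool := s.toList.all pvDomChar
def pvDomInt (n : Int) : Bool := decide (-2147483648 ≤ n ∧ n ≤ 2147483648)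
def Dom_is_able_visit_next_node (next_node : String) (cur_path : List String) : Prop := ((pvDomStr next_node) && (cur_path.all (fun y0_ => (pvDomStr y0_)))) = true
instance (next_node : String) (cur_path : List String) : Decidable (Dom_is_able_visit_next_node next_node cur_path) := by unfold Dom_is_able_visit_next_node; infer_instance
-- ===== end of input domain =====

-- B replaces A's Counter hash-count plus first-match branching loop by sort-then-scan:
-- sort the path, walk maximal runs of equal names, and on the first lowercase run of
-- length exactly 2 answer with a single membership test (objective: alternative).

-- Python str.isupper() / str.islower(), hand-ported (not in PySem): at least one alphabetic
-- character and no character of the opposite case; exact on the printable-ASCII domain,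
-- where the cased characters are exactly the alphabetic ones.
def pyStrIsupper (s : String) : Bool :=
  s.toList.any PySem.Chars.isalpha && s.toList.all (fun c => !PySem.Chars.islower c)

def pyStrIslower (s : String) : Bool :=
  s.toList.any PySem.Chars.isalpha && s.toList.all (fun c => !PySem.Chars.isupper c)

-- ===== PORT A =====
-- the 'for key, value in node_count.items(): …' loop of A, with its early returns and for-else
def pyLoopA (next_node : String) (node_count : PySem.Dict String Int) :
    List (String × Int) → Bool
  | [] => true                                   -- for-else: no small cave has been visited twice
  | (key, value) :: rest =>
    if pyStrIslower key && value == 2 then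
      if key == next_node then false             -- cannot visit a small cave three times
      else
        if node_count.getD next_node 0 == 0 then true else false
    else pyLoopA next_node node_count rest

def is_able_visit_next_node (next_node : String) (cur_path : List String) : Bool :=
  if next_node == "start" then false
  else if pyStrIsupper next_node then true
  else
    let node_count := PySem.Dict.counter cur_path
    pyLoopA next_node node_count node_count.items

-- ===== PORT B =====
-- B's outer while loop over the sorted list: the inner 'while s[j] == s[i]' run scan is the
-- takeWhile, and 'i = j' resumes at the dropWhile
def runScan (next_node : String) (cur_path : List String) : List String → Bool
  | [] => true
  | x :: rest =>
    if (rest.takeWhile (fun y => y == x)).length + 1 == 2 && pyStrIslower x then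
      !(cur_path.contains next_node)
    else runScan next_node cur_path (rest.dropWhile (fun y => y == x))
termination_by l => l.length
decreasing_by
  have := List.length_dropWhile_le (fun y => y == x) rest
  simp only [List.length_cons]; omega

def is_able_visit_next_node_alt (next_node : String) (cur_path : List String) : Bool :=
  if next_node == "start" then false
  else if pyStrIsupper next_node then true
  else runScan next_node cur_path (PySem.List.sorted cur_path (fun x => x) false)

-- ===== PRECONDITION & SPEC =====
def Spec_is_able_visit_next_node (next_node : String) (cur_path : List String) (out : Bool) : Prop := out = is_able_visit_next_node_alt next_node cur_path
instance (next_node : String) (cur_path : List String) (out : Bool) : Decidable (Spec_is_able_visit_next_node next_node cur_path out) := by unfold Spec_is_able_visit_next_node; infer_instance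

-- ===== CLAIM (what is proved, stated in full; the proofs are below) =====
def Claim_equal_is_able_visit_next_node : Prop := ∀ (next_node : String) (cur_path : List String), Dom_is_able_visit_next_node next_node cur_path → Spec_is_able_visit_next_node next_node cur_path (is_able_visit_next_node next_node cur_path)

-- ===== LEMMAS AND PROOFS =====

-- A's scan: its result is 'count(next_node) = 0' iff some dict entry is a small cave seen twice
lemma pyLoopA_eq (next_node : String) (xs : List String) (items : List (String × Int))
    (h : ∀ q ∈ items, q.2 = (xs.count q.1 : Int)) :
    pyLoopA next_node (PySem.Dict.counter xs) items =
      if items.any (fun q => pyStrIslower q.1 && q.2 == 2) then decide (xs.count next_node = 0)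
      else true := by
  induction items with
  | nil => simp [pyLoopA]
  | cons q rest ih =>
    obtain ⟨key, value⟩ := q
    have hv : value = (xs.count key : Int) := h (key, value) List.mem_cons_self
    by_cases hp : (pyStrIslower key && value == 2) = true
    · have hv2 : xs.count key = 2 := by
        have := (Bool.and_eq_true .. ▸ hp).2
        rw [hv] at this
        exact_mod_cast (by simpa using this : (xs.count key : Int) = 2)
      simp only [pyLoopA, hp, if_true, List.any_cons, Bool.true_or]
      rw [PySem.Dict.getD_counter]
      by_cases hk : (key == next_node) = true
      · have hk' : key = next_node := by simpa using hk
        subst hk'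
        simp [hv2]
      · simp only [hk, Bool.false_eq_true, if_false]
        by_cases hz : xs.count next_node = 0 <;> simp [hz]
    · simp only [pyLoopA, Bool.not_eq_true] at hp ⊢
      simp only [hp, Bool.false_eq_true, if_false, List.any_cons, Bool.false_or]
      exact ih (fun q hq => h q (List.mem_cons_of_mem _ hq))

-- the items.any condition is exactly 'some small cave occurs twice in xs'
lemma itemsAny_iff (xs : List String) :
    ((PySem.Dict.counter xs).items.any fun q => pyStrIslower q.1 && q.2 == 2) = true ↔
      ∃ y ∈ xs, pyStrIslower y = true ∧ xs.count y = 2 := by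
  rw [List.any_eq_true]
  constructor
  · rintro ⟨q, hq, hpq⟩
    rw [PySem.Dict.items_counter] at hq
    obtain ⟨k, hk, rfl⟩ := List.mem_map.mp hq
    simp only [Bool.and_eq_true, beq_iff_eq] at hpq
    have hc2 : xs.count k = 2 := by exact_mod_cast hpq.2
    exact ⟨k, (PySem.Set.mem_ofList xs k).mp hk, hpq.1, hc2⟩
  · rintro ⟨y, hy, hlow, hc2⟩
    refine ⟨(y, (xs.count y : Int)), ?_, ?_⟩
    · rw [PySem.Dict.items_counter]
      exact List.mem_map.mpr ⟨y, (PySem.Set.mem_ofList xs y).mpr hy, rfl⟩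
    · simp [hlow, hc2]

-- in a sorted list headed by x, x never occurs after the run of x's
lemma not_mem_dropWhile_of_le (x : String) :
    ∀ (l : List String), l.Pairwise (· ≤ ·) → (∀ y ∈ l, x ≤ y) →
      x ∉ l.dropWhile (fun y => y == x) := by
  intro l
  induction l with
  | nil => simp
  | cons a t ih =>
    intro hp hle
    by_cases ha : (a == x) = true
    · rw [List.dropWhile_cons, if_pos ha]
      exact ih (List.Pairwise.sublist (List.sublist_cons_self a t) hp)
        (fun y hy => hle y (List.mem_cons_of_mem a hy))
    · rw [List.dropWhile_cons, if_neg ha]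
      have hax : a ≠ x := by simpa using ha
      have hlt : x < a := lt_of_le_of_ne (hle a List.mem_cons_self) (Ne.symm hax)
      intro hmem
      rcases List.mem_cons.mp hmem with rfl | hmem
      · exact hax rfl
      · have : a ≤ x := (List.pairwise_cons.mp hp).1 x hmem
        exact absurd (lt_of_lt_of_le hlt this) (lt_irrefl x)

-- counts of y ≠ x survive dropping the head run of x's
lemma count_dropWhile_ne (x y : String) (hne : y ≠ x) (rest : List String) :
    (rest.dropWhile (fun z => z == x)).count y = rest.count y := by
  conv_rhs => rw [← List.takeWhile_append_dropWhile (p := fun z => z == x) (l := rest)]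
  rw [List.count_append]
  have h0 : (rest.takeWhile (fun z => z == x)).count y = 0 := by
    rw [List.count_eq_zero]
    intro hmem
    have := List.mem_takeWhile_imp hmem
    exact hne (by simpa using this)
  omega

-- the head run's length is the head's count in the whole sorted list
lemma count_head_sorted (x : String) (rest : List String)
    (hp : (x :: rest).Pairwise (· ≤ ·)) :
    (x :: rest).count x = (rest.takeWhile (fun y => y == x)).length + 1 := by
  have hx : x ∉ rest.dropWhile (fun y => y == x) :=
    not_mem_dropWhile_of_le x rest
      (List.Pairwise.sublist (List.sublist_cons_self x rest) hp)
      (fun y hy => (List.pairwise_cons.mp hp).1 y hy)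
  have htw : (rest.takeWhile (fun y => y == x)).count x
      = (rest.takeWhile (fun y => y == x)).length := by
    rw [List.count_eq_length]
    intro y hy
    have := List.mem_takeWhile_imp hy
    exact (eq_of_beq this).symm
  have : rest.count x = (rest.takeWhile (fun y => y == x)).length := by
    conv_lhs => rw [← List.takeWhile_append_dropWhile (p := fun y => y == x) (l := rest)]
    rw [List.count_append, htw, List.count_eq_zero.mpr hx]
    omega
  rw [List.count_cons_self, this]

-- B's run scan on a sorted list answers exactly the 'small cave visited twice' question
lemma runScan_eq (n : String) (cp : List String) :
    ∀ (s : List String), s.Pairwise (· ≤ ·) →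
      runScan n cp s =
        if s.any (fun y => pyStrIslower y && s.count y == 2) then !(cp.contains n)
        else true := by
  intro s
  induction s using runScan.induct with
  | case1 => simp [runScan]
  | case2 x rest hcond =>
    intro hp
    have hl : pyStrIslower x = true := (Bool.and_eq_true .. ▸ hcond).2
    have hc2 : (x :: rest).count x = 2 := by
      rw [count_head_sorted x rest hp]
      have h1 : (rest.takeWhile (fun y => y == x)).length + 1 = 2 :=
        beq_iff_eq.mp (Bool.and_eq_true .. ▸ hcond).1
      omega
    have hany : ((x :: rest).any fun y => pyStrIslower y && (x :: rest).count y == 2) = true := by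
      rw [List.any_eq_true]
      exact ⟨x, List.mem_cons_self, by simp [hl, hc2]⟩
    simp only [runScan]
    rw [if_pos hcond, if_pos hany]
  | case3 x rest hcond ih =>
    intro hp
    have hpdrop : (rest.dropWhile (fun y => y == x)).Pairwise (· ≤ ·) :=
      List.Pairwise.sublist
        ((List.dropWhile_sublist _).trans (List.sublist_cons_self x rest)) hp
    have hxnot : x ∉ rest.dropWhile (fun y => y == x) :=
      not_mem_dropWhile_of_le x rest
        (List.Pairwise.sublist (List.sublist_cons_self x rest) hp)
        (fun y hy => (List.pairwise_cons.mp hp).1 y hy)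
    have hcount := count_head_sorted x rest hp
    have hcx : ¬ (pyStrIslower x = true ∧ (x :: rest).count x = 2) := by
      rintro ⟨hl, hc⟩
      apply hcond
      rw [Bool.and_eq_true]
      refine ⟨by rw [hcount] at hc; simpa using hc, hl⟩
    have hiff : ((x :: rest).any fun y => pyStrIslower y && (x :: rest).count y == 2)
        = ((rest.dropWhile (fun y => y == x)).any fun y =>
            pyStrIslower y && (rest.dropWhile (fun z => z == x)).count y == 2) := by
      rw [Bool.eq_iff_iff, List.any_eq_true, List.any_eq_true]
      constructor
      · rintro ⟨y, hy, hpy⟩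
        simp only [Bool.and_eq_true, beq_iff_eq] at hpy
        have hyx : y ≠ x := fun h => hcx ⟨h ▸ hpy.1, h ▸ hpy.2⟩
        have hcy : (rest.dropWhile (fun z => z == x)).count y = 2 := by
          rw [count_dropWhile_ne x y hyx rest]
          have := hpy.2
          rw [List.count_cons_of_ne (Ne.symm hyx)] at this
          exact this
        refine ⟨y, ?_, by simp [hpy.1, hcy]⟩
        exact List.count_pos_iff.mp (by omega)
      · rintro ⟨y, hy, hpy⟩
        simp only [Bool.and_eq_true, beq_iff_eq] at hpy
        have hyx : y ≠ x := fun h => hxnot (h ▸ hy)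
        have hcy : (x :: rest).count y = 2 := by
          rw [List.count_cons_of_ne (Ne.symm hyx), ← count_dropWhile_ne x y hyx rest]
          exact hpy.2
        refine ⟨y, ?_, by simp [hpy.1, hcy]⟩
        exact List.mem_cons_of_mem x
          ((List.dropWhile_sublist (l := rest) (p := fun z => z == x)).mem hy)
    simp only [runScan]
    rw [if_neg hcond, ih hpdrop, hiff]

lemma ports_agree (n : String) (xs : List String) :
    is_able_visit_next_node n xs = is_able_visit_next_node_alt n xs := by
  unfold is_able_visit_next_node is_able_visit_next_node_alt
  by_cases h1 : (n == "start") = true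
  · simp [h1]
  · by_cases h2 : pyStrIsupper n = true
    · simp [h1, h2]
    · simp only [h1, h2, Bool.false_eq_true, if_false]
      rw [pyLoopA_eq n xs _ ?side]
      case side =>
        intro q hq
        rw [PySem.Dict.items_counter] at hq
        obtain ⟨k, hk, rfl⟩ := List.mem_map.mp hq
        rfl
      set s := PySem.List.sorted xs (fun x => x) false with hs
      have hperm : s.Perm xs := PySem.List.sorted_perm xs (fun x => x) false
      have hsortd : s.Pairwise (· ≤ ·) := by
        simpa using PySem.List.sorted_pairwise xs (fun x => x)
      rw [runScan_eq n xs s hsortd]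
      have hiff : ((PySem.Dict.counter xs).items.any fun q => pyStrIslower q.1 && q.2 == 2)
          = (s.any fun y => pyStrIslower y && s.count y == 2) := by
        rw [Bool.eq_iff_iff, itemsAny_iff, List.any_eq_true]
        constructor
        · rintro ⟨y, hy, hl, hc⟩
          exact ⟨y, hperm.mem_iff.mpr hy, by simp [hl, hperm.count_eq y, hc]⟩
        · rintro ⟨y, hy, hpy⟩
          simp only [Bool.and_eq_true, beq_iff_eq, hperm.count_eq y] at hpy
          exact ⟨y, hperm.mem_iff.mp hy, hpy.1, hpy.2⟩
      rw [hiff]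
      by_cases hcond : (s.any fun y => pyStrIslower y && s.count y == 2) = true
      · simp only [hcond, if_true]
        by_cases hm : n ∈ xs <;>
          simp [List.count_eq_zero, List.contains_eq_mem, hm]
      · simp only [Bool.not_eq_true] at hcond
        simp [hcond]

-- ===== VERDICT (by name: the statement is the Claim_ definition above) =====
theorem is_able_visit_next_node_spec : Claim_equal_is_able_visit_next_node := by
  intro next_node cur_path _
  exact ports_agree next_node cur_path
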